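-- pv_equiv track=rewrite | github.com/tabarcea-augustus/advent_code_2023 | first_star.py | find_first_and_last_number
-- ===== SOURCE A (Python) =====
-- def find_first_and_last_number(line):
--     digits = []
--     map_string_to_int = {
--         'one': 1,
--         'two': 2,
--         'three': 3,
--         'four': 4,
--         'five': 5,
--         'six': 6,
--         'seven': 7,
--         'eight': 8,
--         'nine': 9
--         }
--     for idx, x in enumerate(line):
--         if x.isdigit():
--             digits.append( [idx, int(x)] )
--
--     for string_number in map_string_to_int.keys():
--         res = [i for i in range(len(line)) if line.startswith(string_number, i)]
--         for idx_pos in res: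
--             digits.append( [idx_pos, map_string_to_int[string_number]] )
--
--     digits.sort(key=lambda final_numbers: final_numbers[0])
--
--     return int(str(digits[0][1])+str(digits[-1][1]))
-- ===== SOURCE B (Python) =====
-- WORDS = [('one', 1), ('two', 2), ('three', 3), ('four', 4), ('five', 5),
--          ('six', 6), ('seven', 7), ('eight', 8), ('nine', 9)]
--
--
-- def _match_at(line, i):
--     c = line[i]
--     if c.isdigit():
--         return int(c)
--     for w, v in WORDS:
--         if line.startswith(w, i):
--             return v
--     return None
--
--
-- def find_first_and_last_number(line):
--     first = last = None
--     for i in range(len(line)):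
--         v = _match_at(line, i)
--         if v is not None:
--             if first is None:
--                 first = v
--             last = v
--     return int(str(first) + str(last))
-- ===== Notes on version B (the rewrite author's own statement) =====
-- stated objective: simpler
-- what changed: A collects every digit and every spelled-word occurrence into a list (scanning the whole line once per word), sorts it by position and indexes it; B makes a single left-to-right pass over the indices, resolving the match at each index and tracking only the first and last match.
import Mathlib
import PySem

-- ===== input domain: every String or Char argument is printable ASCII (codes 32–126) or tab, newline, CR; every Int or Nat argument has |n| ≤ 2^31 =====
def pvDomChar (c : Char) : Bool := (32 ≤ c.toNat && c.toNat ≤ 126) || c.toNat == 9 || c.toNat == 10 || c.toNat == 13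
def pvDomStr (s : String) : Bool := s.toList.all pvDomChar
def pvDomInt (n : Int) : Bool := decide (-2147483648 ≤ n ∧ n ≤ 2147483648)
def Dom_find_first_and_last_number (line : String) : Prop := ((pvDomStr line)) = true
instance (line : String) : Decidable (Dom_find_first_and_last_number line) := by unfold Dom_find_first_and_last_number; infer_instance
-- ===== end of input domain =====

-- B replaces A's collect-all-matches-then-sort-then-index strategy by a single left-to-right
-- pass that tracks only the first and the last match (objective: simpler).

-- ===== PORT A =====
def find_first_and_last_number (line : String) : Int :=
  let cs := line.toList
  let map_string_to_int : PySem.Dict (List Char) Int :=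
    PySem.Dict.ofList [("one".toList, 1), ("two".toList, 2), ("three".toList, 3),
      ("four".toList, 4), ("five".toList, 5), ("six".toList, 6),
      ("seven".toList, 7), ("eight".toList, 8), ("nine".toList, 9)]
  -- for idx, x in enumerate(line): if x.isdigit(): digits.append([idx, int(x)])
  let digits : List (Int × Int) :=
    (PySem.List.enumerate cs 0).foldl
      (fun acc p =>
        if PySem.Chars.isdigit p.2 then
          acc ++ [(p.1, (PySem.Int.ofChars? [p.2]).getD 0)]  -- int(x): never none on a digit char
        else acc) []
  -- for string_number in map.keys(): res = [i for i in range(len(line)) if line.startswith(string_number, i)]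
  let digits :=
    (PySem.Dict.keys map_string_to_int).foldl
      (fun acc w =>
        let res := (PySem.List.pyRange 0 (PySem.List.len cs) 1).filter
          -- line.startswith(w, i): exact since 0 ≤ i here
          (fun i => PySem.Chars.startswith (PySem.List.slice cs (some i) none) w)
        res.foldl (fun acc2 i =>
          -- map[string_number]: the key comes from keys(), so the lookup never raises
          acc2 ++ [(i, PySem.Dict.getD map_string_to_int w 0)]) acc)
      digits
  let digits := PySem.List.sorted digits (fun p => p.1) false
  match PySem.List.pyGet? digits 0, PySem.List.pyGet? digits (-1) with
  | some a, some b =>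
      -- int(str(digits[0][1]) + str(digits[-1][1])): never none on digit concatenation
      (PySem.Int.ofChars? (PySem.Int.toChars a.2 ++ PySem.Int.toChars b.2)).getD 0
  | _, _ => 0  -- digits[0] raises IndexError in Python: excluded by Pre_

-- ===== PORT B =====
def pvWords : List (List Char × Int) :=
  [("one".toList, 1), ("two".toList, 2), ("three".toList, 3), ("four".toList, 4),
   ("five".toList, 5), ("six".toList, 6), ("seven".toList, 7), ("eight".toList, 8),
   ("nine".toList, 9)]

-- _match_at(line, i)
def pvMatchAt (cs : List Char) (i : Int) : Option Int :=
  match PySem.List.pyGet? cs i with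
  | none => none  -- unreachable: callers pass i ∈ range(len(line))
  | some c =>
    if PySem.Chars.isdigit c then some ((PySem.Int.ofChars? [c]).getD 0)  -- int(c)
    else
      -- for w, v in WORDS: if line.startswith(w, i): return v   (exact since 0 ≤ i here)
      pvWords.findSome? (fun wv =>
        if PySem.Chars.startswith (PySem.List.slice cs (some i) none) wv.1 then some wv.2
        else none)

def find_first_and_last_number_alt (line : String) : Int :=
  let cs := line.toList
  let st := (PySem.List.pyRange 0 (PySem.List.len cs) 1).foldl
    (fun (st : Option Int × Option Int) i =>
      match pvMatchAt cs i with
      | some v => (some (st.1.getD v), some v)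
      | none => st) (none, none)
  match st.1 with
  | none => 0  -- no digit and no spelled word: Python raises ValueError; excluded by Pre_
  | some f =>
    match st.2 with
    | none => 0  -- unreachable: last is set whenever first is
    | some l => (PySem.Int.ofChars? (PySem.Int.toChars f ++ PySem.Int.toChars l)).getD 0

-- ===== PRECONDITION & SPEC =====
-- Pre_ excludes exactly the lines with no digit and no spelled number: there A raises
-- IndexError (digits[0] on the empty list) and B raises ValueError.
def Pre_find_first_and_last_number (line : String) : Prop :=
  (line.toList.any PySem.Chars.isdigit = true) ∨
  (∃ w ∈ ["one".toList, "two".toList, "three".toList, "four".toList, "five".toList,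
          "six".toList, "seven".toList, "eight".toList, "nine".toList],
    PySem.Chars.isIn w line.toList = true)
instance (line : String) : Decidable (Pre_find_first_and_last_number line) := by
  unfold Pre_find_first_and_last_number; infer_instance

def pvWitness_find_first_and_last_number : String := "x1two"

def Spec_find_first_and_last_number (line : String) (out : Int) : Prop := out = find_first_and_last_number_alt line
instance (line : String) (out : Int) : Decidable (Spec_find_first_and_last_number line out) := by unfold Spec_find_first_and_last_number; infer_instance

-- ===== CLAIM (what is proved, stated in full; the proofs are below) =====
def Claim_equal_find_first_and_last_number : Prop := ∀ (line : String), Dom_find_first_and_last_number line → Pre_find_first_and_last_number line → Spec_find_first_and_last_number line (find_first_and_last_number line)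

-- ===== LEMMAS AND PROOFS =====

-- the canonical list of matches: (index, value) at every index where _match_at fires
def pvMatches (cs : List Char) : List (Int × Int) :=
  (PySem.List.pyRange 0 (PySem.List.len cs) 1).filterMap
    (fun i => (pvMatchAt cs i).map (fun v => (i, v)))

-- A's pre-sort list, written with its folds resolved
def pvAList (cs : List Char) : List (Int × Int) :=
  ((PySem.List.enumerate cs 0).filter (fun p => PySem.Chars.isdigit p.2)).map
      (fun p => (p.1, (PySem.Int.ofChars? [p.2]).getD 0))
    ++ pvWords.flatMap (fun wv =>
        ((PySem.List.pyRange 0 (PySem.List.len cs) 1).filter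
          (fun i => PySem.Chars.startswith (PySem.List.slice cs (some i) none) wv.1)).map
          (fun i => (i, wv.2)))

theorem pvA_unfold (line : String) :
    find_first_and_last_number line =
      (match PySem.List.pyGet? (PySem.List.sorted (pvAList line.toList) (fun p => p.1) false) 0,
             PySem.List.pyGet? (PySem.List.sorted (pvAList line.toList) (fun p => p.1) false) (-1) with
       | some a, some b =>
           (PySem.Int.ofChars? (PySem.Int.toChars a.2 ++ PySem.Int.toChars b.2)).getD 0
       | _, _ => 0) := by
  unfold find_first_and_last_number pvAList
  simp only [PySem.List.foldl_append_ite, PySem.List.foldl_append_singleton_eq_map,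
    PySem.List.foldl_append_eq_flatMap, List.nil_append, Bool.decide_eq_true]
  rw [show pvWords = (PySem.Dict.keys (PySem.Dict.ofList
      [("one".toList, (1:Int)), ("two".toList, 2), ("three".toList, 3),
       ("four".toList, 4), ("five".toList, 5), ("six".toList, 6),
       ("seven".toList, 7), ("eight".toList, 8), ("nine".toList, 9)])).map
      (fun w => (w, PySem.Dict.getD (PySem.Dict.ofList
      [("one".toList, (1:Int)), ("two".toList, 2), ("three".toList, 3),
       ("four".toList, 4), ("five".toList, 5), ("six".toList, 6),
       ("seven".toList, 7), ("eight".toList, 8), ("nine".toList, 9)]) w 0)) from by decide,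
    List.flatMap_map]

theorem pv_words_head : ∀ wv ∈ pvWords, wv.1.head?.any (fun c => !PySem.Chars.isdigit c) = true := by
  decide

theorem pv_words_no_prefix : ∀ p ∈ pvWords, ∀ q ∈ pvWords, p.1 <+: q.1 → p = q := by
  decide

theorem pv_findSome?_unique {α β : Type} (l : List α) (f : α → Option β) (x : α) (v : β)
    (hx : x ∈ l) (hfx : f x = some v) (huniq : ∀ y ∈ l, f y ≠ none → y = x) :
    l.findSome? f = some v := by
  induction l with
  | nil => cases hx
  | cons a l ih =>
    rcases List.mem_cons.mp hx with h | h
    · subst h; simp [hfx]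
    · cases hfa : f a with
      | some w =>
        have hax := huniq a (List.mem_cons_self ..) (by simp [hfa])
        subst hax
        simp [hfx]
      | none =>
        simp only [List.findSome?_cons, hfa]
        exact ih h fun y hy hne => huniq y (List.mem_cons_of_mem _ hy) hne

-- a digit at index k excludes every word match there
theorem pv_digit_no_word (cs : List Char) (k : Nat) (c : Char) (hc : cs[k]? = some c)
    (hd : PySem.Chars.isdigit c = true) (wv : List Char × Int) (hw : wv ∈ pvWords) :
    ¬ wv.1 <+: cs.drop k := by
  intro hpre
  have hhead := pv_words_head wv hw
  cases hwv : wv.1 with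
  | nil => rw [hwv] at hhead; simp at hhead
  | cons c' t =>
    rw [hwv] at hpre hhead
    obtain ⟨r, hr⟩ := hpre
    have : (cs.drop k).head? = some c' := by rw [← hr]; simp
    rw [List.head?_drop, hc] at this
    simp at hhead
    rw [(Option.some.injEq .. ▸ this : c = c')] at hd
    simp [hd] at hhead

theorem pv_word_unique (cs : List Char) (k : Nat) (p q : List Char × Int)
    (hp : p ∈ pvWords) (hq : q ∈ pvWords)
    (h1 : p.1 <+: cs.drop k) (h2 : q.1 <+: cs.drop k) : p = q := by
  rcases List.prefix_or_prefix_of_prefix h1 h2 with h | h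
  · exact pv_words_no_prefix p hp q hq h
  · exact (pv_words_no_prefix q hq p hp h).symm

theorem pv_matchAt_digit (cs : List Char) (k : Nat) (c : Char) (hc : cs[k]? = some c)
    (hd : PySem.Chars.isdigit c = true) :
    pvMatchAt cs (k : Int) = some ((PySem.Int.ofChars? [c]).getD 0) := by
  simp [pvMatchAt, hc, hd]

theorem pv_matchAt_word (cs : List Char) (k : Nat) (c : Char) (hc : cs[k]? = some c)
    (hd : PySem.Chars.isdigit c = false) (wv : List Char × Int) (hw : wv ∈ pvWords)
    (hpre : wv.1 <+: cs.drop k) : pvMatchAt cs (k : Int) = some wv.2 := by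
  simp only [pvMatchAt, PySem.List.pyGet?_natCast, hc, hd, Bool.false_eq_true, if_false]
  refine pv_findSome?_unique _ _ wv wv.2 hw ?_ ?_
  · simp [PySem.List.slice_from_natCast, PySem.Chars.startswith_iff, hpre]
  · intro y hy hne
    refine pv_word_unique cs k y wv hy hw ?_ hpre
    rw [PySem.List.slice_from_natCast] at hne
    by_cases hs : PySem.Chars.startswith (List.drop k cs) y.1 = true
    · exact (PySem.Chars.startswith_iff _ _).mp hs
    · simp [hs] at hne

theorem pv_matchAt_nodigit (cs : List Char) (k : Nat) (c : Char) (hc : cs[k]? = some c)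
    (hd : PySem.Chars.isdigit c = false) :
    pvMatchAt cs (k : Int) =
      pvWords.findSome? (fun wv =>
        if PySem.Chars.startswith (PySem.List.slice cs (some (k : Int)) none) wv.1 then some wv.2
        else none) := by
  simp [pvMatchAt, hc, hd]

-- the membership characterisation shared by both programs
theorem pv_mem_matches (cs : List Char) (p : Int × Int) :
    p ∈ pvMatches cs ↔
      ∃ k : Nat, k < cs.length ∧ p.1 = (k : Int) ∧ pvMatchAt cs (k : Int) = some p.2 := by
  unfold pvMatches
  rw [List.mem_filterMap]
  constructor
  · rintro ⟨i, hi, hmap⟩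
    rw [PySem.List.mem_pyRange_one] at hi
    rw [PySem.List.len_eq] at hi
    obtain ⟨v, hv, hpv⟩ := Option.map_eq_some_iff.mp hmap
    refine ⟨i.toNat, by omega, ?_, ?_⟩
    · rw [← hpv]; simp [Int.toNat_of_nonneg hi.1]
    · rw [Int.toNat_of_nonneg hi.1, hv, ← hpv]
  · rintro ⟨k, hk, hp1, hpm⟩
    refine ⟨(k : Int), ?_, ?_⟩
    · rw [PySem.List.mem_pyRange_one, PySem.List.len_eq]; omega
    · rw [hpm]; simp [← hp1]

theorem pv_mem_alist (cs : List Char) (p : Int × Int) :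
    p ∈ pvAList cs ↔
      ∃ k : Nat, k < cs.length ∧ p.1 = (k : Int) ∧ pvMatchAt cs (k : Int) = some p.2 := by
  unfold pvAList
  rw [List.mem_append]
  constructor
  · rintro (hd | hw)
    · rw [List.mem_map] at hd
      obtain ⟨q, hq, hqp⟩ := hd
      rw [List.mem_filter] at hq
      obtain ⟨hqe, hqd⟩ := hq
      rw [PySem.List.mem_enumerate_iff] at hqe
      obtain ⟨k, hk, hq'⟩ := hqe
      subst hq'
      simp only at hqd
      refine ⟨k, hk, ?_, ?_⟩
      · rw [← hqp]; simp
      · rw [pv_matchAt_digit cs k cs[k] (List.getElem?_eq_getElem hk) hqd, ← hqp]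
    · rw [List.mem_flatMap] at hw
      obtain ⟨wv, hwv, hmem⟩ := hw
      rw [List.mem_map] at hmem
      obtain ⟨i, hi, hip⟩ := hmem
      rw [List.mem_filter] at hi
      obtain ⟨hir, his⟩ := hi
      rw [PySem.List.mem_pyRange_one, PySem.List.len_eq] at hir
      obtain ⟨k, rfl⟩ : ∃ k : Nat, i = (k : Int) := ⟨i.toNat, by omega⟩
      have hk : k < cs.length := by omega
      rw [PySem.List.slice_from_natCast] at his
      have hpre := (PySem.Chars.startswith_iff _ _).mp his
      cases hdig : PySem.Chars.isdigit cs[k] with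
      | true => exact absurd hpre (pv_digit_no_word cs k cs[k] (List.getElem?_eq_getElem hk) hdig wv hwv)
      | false =>
        refine ⟨k, hk, ?_, ?_⟩
        · rw [← hip]
        · rw [pv_matchAt_word cs k cs[k] (List.getElem?_eq_getElem hk) hdig wv hwv hpre, ← hip]
  · rintro ⟨k, hk, hp1, hpm⟩
    by_cases hdig : PySem.Chars.isdigit cs[k] = true
    · rw [pv_matchAt_digit cs k cs[k] (List.getElem?_eq_getElem hk) hdig] at hpm
      left
      rw [List.mem_map]
      refine ⟨((k : Int), cs[k]), ?_, ?_⟩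
      · rw [List.mem_filter]
        refine ⟨?_, by simpa using hdig⟩
        rw [PySem.List.mem_enumerate_iff]
        exact ⟨k, hk, by simp⟩
      · exact Prod.ext hp1.symm (Option.some.inj hpm)
    · right
      rw [pv_matchAt_nodigit cs k cs[k] (List.getElem?_eq_getElem hk)
        (Bool.not_eq_true _ ▸ hdig)] at hpm
      obtain ⟨wv, hwv, hfwv⟩ := List.exists_of_findSome?_eq_some hpm
      by_cases hs : PySem.Chars.startswith (PySem.List.slice cs (some (k : Int)) none) wv.1 = true
      · rw [if_pos hs] at hfwv
        rw [List.mem_flatMap]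
        refine ⟨wv, hwv, ?_⟩
        rw [List.mem_map]
        refine ⟨(k : Int), ?_, ?_⟩
        · rw [List.mem_filter]
          refine ⟨?_, hs⟩
          rw [PySem.List.mem_pyRange_one, PySem.List.len_eq]
          omega
        · exact Prod.ext hp1.symm (Option.some.inj hfwv)
      · rw [if_neg hs] at hfwv
        cases hfwv

theorem pv_matches_pairwise (cs : List Char) :
    (pvMatches cs).Pairwise (fun a b => a.1 < b.1) := by
  unfold pvMatches
  refine List.Pairwise.filterMap _ ?_ (PySem.List.pairwise_lt_pyRange_one 0 (PySem.List.len cs))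
  intro a b hab x hx y hy
  cases ha : pvMatchAt cs a <;> rw [ha] at hx <;> simp at hx
  cases hb : pvMatchAt cs b <;> rw [hb] at hy <;> simp at hy
  rw [← hx, ← hy]
  exact hab

theorem pv_matches_ne_nil (line : String) (hpre : Pre_find_first_and_last_number line) :
    pvMatches line.toList ≠ [] := by
  have hexists : ∃ p, p ∈ pvMatches line.toList := by
    rcases hpre with hany | ⟨w, hw, hin⟩
    · obtain ⟨c, hc, hd⟩ := List.any_eq_true.mp hany
      obtain ⟨k, hk, hck⟩ := List.mem_iff_getElem.mp hc
      refine ⟨((k : Int), (PySem.Int.ofChars? [c]).getD 0),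
        (pv_mem_matches _ _).mpr ⟨k, hk, rfl, ?_⟩⟩
      rw [pv_matchAt_digit line.toList k c (by rw [List.getElem?_eq_getElem hk, hck]) hd]
    · have hwv : ∀ w' ∈ ["one".toList, "two".toList, "three".toList, "four".toList,
          "five".toList, "six".toList, "seven".toList, "eight".toList, "nine".toList],
          ∃ wv ∈ pvWords, wv.1 = w' := by decide
      obtain ⟨wv, hwvm, hwv1⟩ := hwv w hw
      have hinf := (PySem.Chars.isIn_iff_infix w line.toList).mp hin
      obtain ⟨sp, tp, hst⟩ := hinf
      have hwne : wv.1 ≠ [] := by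
        have := pv_words_head wv hwvm
        cases h : wv.1 with
        | nil => rw [h] at this; simp at this
        | cons a t => simp
      have hpre' : wv.1 <+: line.toList.drop sp.length := by
        rw [← hst, hwv1, List.append_assoc, List.drop_left]
        exact ⟨tp, rfl⟩
      have hk : sp.length < line.toList.length := by
        rw [← hst]
        have : w ≠ [] := hwv1 ▸ hwne
        cases w with
        | nil => exact absurd rfl this
        | cons a t => simp

      cases hdig : PySem.Chars.isdigit line.toList[sp.length] with
      | true =>
        exact ⟨((sp.length : Int), (PySem.Int.ofChars? [line.toList[sp.length]]).getD 0),
          (pv_mem_matches _ _).mpr ⟨sp.length, hk, rfl,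
            by rw [pv_matchAt_digit line.toList sp.length _ (List.getElem?_eq_getElem hk) hdig]⟩⟩
      | false =>
        exact ⟨((sp.length : Int), wv.2),
          (pv_mem_matches _ _).mpr ⟨sp.length, hk, rfl,
            pv_matchAt_word line.toList sp.length _ (List.getElem?_eq_getElem hk) hdig wv hwvm hpre'⟩⟩
  obtain ⟨p, hp⟩ := hexists
  exact List.ne_nil_of_mem hp

-- sorted head/last of any list with the same members as a strictly increasing list
theorem pv_pairwise_le_getLast {α : Type} (key : α → Int) (l : List α)
    (hp : l.Pairwise (fun a b => key a ≤ key b)) (y : α) (hy : y ∈ l) (h : l ≠ []) :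
    key y ≤ key (l.getLast h) := by
  rw [List.pairwise_iff_getElem] at hp
  obtain ⟨i, hi, hiy⟩ := List.mem_iff_getElem.mp hy
  rw [List.getLast_eq_getElem]
  rcases Nat.lt_or_ge i (l.length - 1) with hlt | hge
  · exact hiy ▸ hp i (l.length - 1) hi (by omega) hlt
  · have : i = l.length - 1 := by omega
    subst this; rw [hiy]

theorem pv_pairwise_lt_getLast_mem {α : Type} (key : α → Int) (l : List α)
    (hp : l.Pairwise (fun a b => key a < key b)) (y : α) (hy : y ∈ l) (h : l ≠ [])
    (hk : key (l.getLast h) ≤ key y) : y = l.getLast h := by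
  rw [List.pairwise_iff_getElem] at hp
  obtain ⟨i, hi, hiy⟩ := List.mem_iff_getElem.mp hy
  rw [List.getLast_eq_getElem] at hk ⊢
  rcases Nat.lt_or_ge i (l.length - 1) with hlt | hge
  · exact absurd (hiy ▸ hp i (l.length - 1) hi (by omega) hlt) (by omega)
  · have : i = l.length - 1 := by omega
    subst this; rw [hiy]

theorem pv_pairwise_lt_head_mem {α : Type} (key : α → Int) (l : List α)
    (hp : l.Pairwise (fun a b => key a < key b)) (y : α) (hy : y ∈ l) (h : l ≠ [])
    (hk : key y ≤ key (l.head h)) : y = l.head h := by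
  rw [List.pairwise_iff_getElem] at hp
  obtain ⟨i, hi, hiy⟩ := List.mem_iff_getElem.mp hy
  rw [List.head_eq_getElem] at hk ⊢
  rcases Nat.eq_zero_or_pos i with h0 | h0
  · subst h0; rw [hiy]
  · exact absurd (hiy ▸ hp 0 i (by omega) hi h0) (by omega)

-- B's fold computes (first match, last match)
theorem pv_foldl_firstlast (g : Int → Option Int) (l : List Int) (p q : Option Int) :
    l.foldl
      (fun (st : Option Int × Option Int) i =>
        match g i with
        | some v => (some (st.1.getD v), some v)
        | none => st) (p, q)
      = (p.or (l.filterMap g).head?, ((l.filterMap g).getLast?).or q) := by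
  induction l generalizing p q with
  | nil => simp
  | cons i l ih =>
    cases hg : g i with
    | none => simp [hg, ih]
    | some v =>
      simp only [List.foldl_cons, hg, List.filterMap_cons]
      rw [ih]
      cases hfl : List.filterMap g l <;> cases p <;> simp [List.getLast?_cons]

-- ===== VERDICT (by name: the statement is the Claim_ definition above) =====
theorem pv_filterMap_matchAt (cs : List Char) :
    (PySem.List.pyRange 0 (PySem.List.len cs) 1).filterMap (pvMatchAt cs)
      = (pvMatches cs).map (fun p => p.2) := by
  unfold pvMatches
  rw [List.map_filterMap]
  congr 1
  funext i
  cases pvMatchAt cs i <;> simp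

theorem find_first_and_last_number_spec : Claim_equal_find_first_and_last_number := by
  unfold Claim_equal_find_first_and_last_number
  intro line hdom hpre
  unfold Spec_find_first_and_last_number
  have hne : pvMatches line.toList ≠ [] := pv_matches_ne_nil line hpre
  have hpw : (pvMatches line.toList).Pairwise (fun a b => a.1 < b.1) :=
    pv_matches_pairwise line.toList
  have hmemiff : ∀ p, p ∈ pvAList line.toList ↔ p ∈ pvMatches line.toList :=
    fun p => (pv_mem_alist line.toList p).trans (pv_mem_matches line.toList p).symm
  -- B computes the pair (first match value, last match value)
  have hB : find_first_and_last_number_alt line =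
      (PySem.Int.ofChars? (PySem.Int.toChars ((pvMatches line.toList).head hne).2 ++
        PySem.Int.toChars ((pvMatches line.toList).getLast hne).2)).getD 0 := by
    unfold find_first_and_last_number_alt
    simp only []
    rw [pv_foldl_firstlast (pvMatchAt line.toList), pv_filterMap_matchAt]
    rw [List.head?_map, List.getLast?_map, List.head?_eq_some_head hne,
      List.getLast?_eq_some_getLast hne]
    simp
  rw [hB, pvA_unfold line]
  -- A's sorted list is nonempty
  obtain ⟨p0, hp0⟩ := List.exists_mem_of_ne_nil _ hne
  have hane : pvAList line.toList ≠ [] :=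
    List.ne_nil_of_mem ((hmemiff p0).mpr hp0)
  have hsne : PySem.List.sorted (pvAList line.toList) (fun p => p.1) false ≠ [] := by
    intro h
    exact hane ((PySem.List.sorted_eq_nil_iff _ _ _).mp h)
  -- head of the sorted list is the first match
  have hhead : (PySem.List.sorted (pvAList line.toList) (fun p => p.1) false).head hsne
      = (pvMatches line.toList).head hne := by
    have hmem : (PySem.List.sorted (pvAList line.toList) (fun p => p.1) false).head hsne
        ∈ pvMatches line.toList := by
      rw [← hmemiff, ← PySem.List.mem_sorted (key := fun p : Int × Int => p.1) (rev := false)]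
      exact List.head_mem hsne
    refine pv_pairwise_lt_head_mem (fun p => p.1) _ hpw _ hmem hne ?_
    exact PySem.List.key_head_sorted_le (pvAList line.toList) (fun p : Int × Int => p.1)
      (List.cons_head_tail hsne).symm ((pvMatches line.toList).head hne)
      ((hmemiff _).mpr (List.head_mem hne))
  -- last of the sorted list is the last match
  have hlast : (PySem.List.sorted (pvAList line.toList) (fun p => p.1) false).getLast hsne
      = (pvMatches line.toList).getLast hne := by
    have hmem : (PySem.List.sorted (pvAList line.toList) (fun p => p.1) false).getLast hsne
        ∈ pvMatches line.toList := by
      rw [← hmemiff, ← PySem.List.mem_sorted (key := fun p : Int × Int => p.1) (rev := false)]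
      exact List.getLast_mem hsne
    refine pv_pairwise_lt_getLast_mem (fun p => p.1) _ hpw _ hmem hne ?_
    refine pv_pairwise_le_getLast (fun p => p.1) _ ?_ _ ?_ hsne
    · exact PySem.List.sorted_pairwise _ _
    · rw [PySem.List.mem_sorted (key := fun p : Int × Int => p.1) (rev := false)]
      exact (hmemiff _).mpr (List.getLast_mem hne)
  rw [PySem.List.pyGet?_zero, PySem.List.pyGet?_neg_one,
    ← List.head?_eq_getElem?, List.head?_eq_some_head hsne, List.getLast?_eq_some_getLast hsne,
    hhead, hlast]
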